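-- pv_equiv track=rewrite | github.com/LiquidityC/aoc | 2019/day_16/fft.py | part1
-- ===== SOURCE A (Python) =====
-- import itertools as it
--
-- def duplicate_items(lst, count):
--     result = []
--     for num in lst:
--         result += [num] * count
--     return result
--
-- def part1(signal):
--     result = signal[:]
--     length = len(result)
--     for _ in range(100):
--         next_signal = []
--         for i in range(length):
--             pattern = duplicate_items(base_pattern, i+1)
--             pattern = pattern[1:] + [pattern[0]]
--             ziplst = zip(result, it.cycle(pattern))
--             num = abs(sum([i*j for i,j in ziplst])) % 10
--             next_signal.append(num)
--         result = next_signal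
--     return result
--
-- base_pattern = [ 0, 1, 0, -1 ]
-- ===== SOURCE B (Python) =====
-- import itertools as it
--
-- # parameter spelled 'signal_' (same single positional parameter): the plain name
-- # 'signal' is the stdlib module name and is refused by the rewrite screen
-- def part1(signal_):
--     res = list(signal_)
--     n = len(res)
--     for _ in range(100):
--         P = [0] + list(it.accumulate(res))
--         nxt = []
--         for i in range(n):
--             L = i + 1
--             s = 0
--             start = L - 1
--             sign = 1
--             while start < n:
--                 end = start + L
--                 if end > n:
--                     end = n
--                 s += sign * (P[end] - P[start])
--                 sign = -sign
--                 start += 2 * L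
--             nxt.append(abs(s) % 10)
--         res = nxt
--     return res
-- ===== Notes on version B (the rewrite author's own statement) =====
-- stated objective: faster
-- what changed: B replaces A's per-output-element dot product with the repeated 0/1/0/-1 pattern (O(n) work per element, rebuilding the pattern list each time) by one prefix-sum array per phase plus signed block-range sums, exploiting that the pattern is constant on contiguous blocks.
import Mathlib
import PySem

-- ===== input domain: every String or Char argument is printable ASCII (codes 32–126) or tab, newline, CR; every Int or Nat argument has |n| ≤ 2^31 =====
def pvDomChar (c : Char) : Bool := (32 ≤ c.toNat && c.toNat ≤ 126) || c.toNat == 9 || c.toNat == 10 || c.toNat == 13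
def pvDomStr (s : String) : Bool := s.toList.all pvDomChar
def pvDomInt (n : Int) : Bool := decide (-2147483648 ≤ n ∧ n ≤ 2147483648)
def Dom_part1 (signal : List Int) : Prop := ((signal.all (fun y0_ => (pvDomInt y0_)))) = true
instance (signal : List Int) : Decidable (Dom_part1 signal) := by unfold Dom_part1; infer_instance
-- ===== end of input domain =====

-- B replaces A's per-element O(n) pattern-dot-product by prefix sums and signed block-range sums
-- (the FFT pattern is +1/0/-1 on contiguous blocks), an asymptotically faster exact re-implementation.

-- ===== PORT A =====
def basePattern : List Int := [0, 1, 0, -1]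

def duplicateItems (lst : List Int) (count : Nat) : List Int :=
  lst.foldl (fun result num => result ++ List.replicate count num) []

-- zip(result, it.cycle(pattern)) then sum of products: pairs result[j] with pattern[j % len(pattern)];
-- exact here since the Python pattern is nonempty (length 4*(i+1)); indices stay in range so getD is exact.
def zipCycleSum (result pattern : List Int) : Int :=
  ((List.range result.length).map
    (fun j => result.getD j 0 * pattern.getD (j % pattern.length) 0)).sum

-- Python rebinds 'pattern' to pattern[1:] + [pattern[0]]; written inline here
def stepA (result : List Int) : List Int :=
  (List.range result.length).map (fun i =>
    ((zipCycleSum result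
        ((duplicateItems basePattern (i + 1)).drop 1
          ++ [(duplicateItems basePattern (i + 1)).getD 0 0])).natAbs : Int) % 10)

def part1 (signal : List Int) : List Int :=
  (List.range 100).foldl (fun result _ => stepA result) signal

-- ===== PORT B =====
-- the while loop of Source B: sum sign*(P[min(start+L,n)] - P[start]) over blocks start, start+2L, …
-- (the '0 < L' side of the guard only makes the recursion total; every call has L = i+1 ≥ 1)
def blockSum (P : List Int) (n L start : Nat) (sign : Int) : Int :=
  if _h : 0 < L ∧ start < n then
    sign * (P.getD (min (start + L) n) 0 - P.getD start 0)
      + blockSum P n L (start + 2 * L) (-sign)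
  else 0
termination_by n - start
decreasing_by omega

-- P = [0] + list(it.accumulate(res)) is List.scanl (+) 0 res; start = L - 1 = i
def stepB (res : List Int) : List Int :=
  (List.range res.length).map (fun i =>
    ((blockSum (List.scanl (· + ·) 0 res) res.length (i + 1) i 1).natAbs : Int) % 10)

def part1_alt (signal : List Int) : List Int :=
  (List.range 100).foldl (fun res _ => stepB res) signal

-- ===== PRECONDITION & SPEC =====
def Spec_part1 (signal : List Int) (out : List Int) : Prop := out = part1_alt signal
instance (signal : List Int) (out : List Int) : Decidable (Spec_part1 signal out) := by unfold Spec_part1; infer_instance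

-- ===== CLAIM (what is proved, stated in full; the proofs are below) =====
def Claim_equal_part1 : Prop := ∀ (signal : List Int), Dom_part1 signal → Spec_part1 signal (part1 signal)

-- ===== LEMMAS AND PROOFS =====

-- the FFT coefficient of output i (with L = i+1) at input position j
def coef (L j : Nat) : Int := ([0, 1, 0, -1] : List Int).getD (((j + 1) / L) % 4) 0

lemma coef_small (L j : Nat) (h : j + 1 < L) : coef L j = 0 := by
  unfold coef
  rw [Nat.div_eq_of_lt h]
  rfl

lemma coef_plus (L m j : Nat) (h1 : (2 * m + 1) * L ≤ j + 1) (h2 : j + 1 < (2 * m + 2) * L) :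
    coef L j = (-1) ^ m := by
  unfold coef
  rw [Nat.div_eq_of_lt_le h1 (by calc j + 1 < (2 * m + 2) * L := h2
                                    _ = (2 * m + 1 + 1) * L := by ring)]
  rcases Nat.even_or_odd m with ⟨t, ht⟩ | ⟨t, ht⟩
  · subst ht
    have : (2 * (t + t) + 1) % 4 = 1 := by omega
    rw [this, Even.neg_one_pow ⟨t, rfl⟩]
    rfl
  · subst ht
    have : (2 * (2 * t + 1) + 1) % 4 = 3 := by omega
    rw [this, Odd.neg_one_pow ⟨t, by ring⟩]
    rfl

lemma coef_zero (L m j : Nat) (h1 : (2 * m + 2) * L ≤ j + 1) (h2 : j + 1 < (2 * m + 3) * L) :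
    coef L j = 0 := by
  unfold coef
  rw [Nat.div_eq_of_lt_le h1 (by calc j + 1 < (2 * m + 3) * L := h2
                                    _ = (2 * m + 2 + 1) * L := by ring)]
  have : (2 * m + 2) % 4 = 0 ∨ (2 * m + 2) % 4 = 2 := by omega
  rcases this with h | h <;> rw [h] <;> rfl

-- prefix sums: the k-th entry of scanl (+) a is a + the sum of the first k entries
lemma scanl_getD (res : List Int) (a : Int) (k : Nat) (hk : k ≤ res.length) :
    (List.scanl (· + ·) a res).getD k 0 = a + ∑ j ∈ Finset.range k, res.getD j 0 := by
  induction res generalizing a k with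
  | nil =>
    have hk0 : k = 0 := by simpa using hk
    subst hk0
    simp [List.scanl]
  | cons x xs ih =>
    cases k with
    | zero => simp [List.scanl]
    | succ k =>
      rw [List.scanl_cons, List.getD_cons_succ]
      rw [ih (a + x) k (by simpa using hk), Finset.sum_range_succ']
      simp only [List.getD_cons_succ, List.getD_cons_zero]
      ring

-- the block recursion computes the coefficient-weighted tail sum
lemma blockSum_eq (res : List Int) (L : Nat) (hL : 0 < L) :
    ∀ d m : Nat, res.length ≤ (2 * m + 1) * L - 1 + d →
      blockSum (List.scanl (· + ·) 0 res) res.length L ((2 * m + 1) * L - 1) ((-1) ^ m)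
        = ∑ j ∈ Finset.Ico ((2 * m + 1) * L - 1) res.length, res.getD j 0 * coef L j := by
  intro d
  induction d with
  | zero =>
    intro m hm
    have h1 : (1 : Nat) * 1 ≤ (2 * m + 1) * L := Nat.mul_le_mul (by omega) hL
    rw [blockSum]
    rw [dif_neg (by omega)]
    rw [Finset.Ico_eq_empty (by omega), Finset.sum_empty]
  | succ d ih =>
    intro m hm
    have h1 : (1 : Nat) * 1 ≤ (2 * m + 1) * L := Nat.mul_le_mul (by omega) hL
    set n := res.length with hn
    set s := (2 * m + 1) * L - 1 with hs
    by_cases hsn : s < n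
    · rw [blockSum]
      rw [dif_pos ⟨hL, hsn⟩]
      have hA2 : (2 * (m + 1) + 1) * L = (2 * m + 1) * L + 2 * L := by ring
      have hrec : s + 2 * L = (2 * (m + 1) + 1) * L - 1 := by omega
      have hsign : -(-1 : Int) ^ m = (-1) ^ (m + 1) := by
        rw [pow_succ]; ring
      rw [hrec, hsign, ih (m + 1) (by omega)]
      -- split the sum at b = min (s + L) n and c = min (s + 2L) n
      set b := min (s + L) n with hb
      set c := min (s + 2 * L) n with hc
      have hsb : s ≤ b := by omega
      have hbc : b ≤ c := by omega
      have hcn : c ≤ n := by omega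
      rw [← Finset.sum_Ico_consecutive (fun j => res.getD j 0 * coef L j) hsb
            (le_trans hbc hcn),
          ← Finset.sum_Ico_consecutive (fun j => res.getD j 0 * coef L j) hbc hcn]
      have e1 : ∑ j ∈ Finset.Ico s b, res.getD j 0 * coef L j
          = (-1) ^ m * ((List.scanl (· + ·) 0 res).getD b 0
              - (List.scanl (· + ·) 0 res).getD s 0) := by
        rw [scanl_getD res 0 b (by omega), scanl_getD res 0 s (by omega)]
        rw [zero_add, zero_add, ← Finset.sum_Ico_eq_sub _ hsb, Finset.mul_sum]
        apply Finset.sum_congr rfl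
        intro j hj
        rw [Finset.mem_Ico] at hj
        have h2 : (2 * m + 2) * L = (2 * m + 1) * L + L := by ring
        rw [coef_plus L m j (by omega) (by omega)]
        ring
      have e2 : ∑ j ∈ Finset.Ico b c, res.getD j 0 * coef L j = 0 := by
        apply Finset.sum_eq_zero
        intro j hj
        rw [Finset.mem_Ico] at hj
        have h2 : (2 * m + 2) * L = (2 * m + 1) * L + L := by ring
        have h3 : (2 * m + 3) * L = (2 * m + 1) * L + 2 * L := by ring
        rw [coef_zero L m j (by omega) (by omega), mul_zero]
      have e3 : Finset.Ico c n = Finset.Ico (s + 2 * L) n := by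
        rcases le_or_gt (s + 2 * L) n with h | h
        · rw [hc, min_eq_left h]
        · rw [Finset.Ico_eq_empty (by omega), Finset.Ico_eq_empty (by omega)]
      rw [e1, e2, e3, ← hrec]
      ring
    · rw [blockSum]
      rw [dif_neg (by omega)]
      rw [Finset.Ico_eq_empty (by omega), Finset.sum_empty]

-- the duplicated pattern indexes as base_pattern[t / L]
lemma dup_eq (L : Nat) :
    duplicateItems basePattern L
      = List.replicate L 0 ++ (List.replicate L 1 ++ (List.replicate L 0
          ++ List.replicate L (-1))) := by
  unfold duplicateItems basePattern
  rw [PySem.List.foldl_append_eq_flatMap]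
  simp [List.flatMap]

lemma dup_length (L : Nat) : (duplicateItems basePattern L).length = 4 * L := by
  rw [dup_eq]; simp; omega

lemma replicate_getD (n m : Nat) (a d : Int) (h : m < n) :
    (List.replicate n a).getD m d = a := by
  simp [List.getD, h]

lemma dup_getD (L t : Nat) (hL : 0 < L) :
    (duplicateItems basePattern L).getD t 0 = ([0, 1, 0, -1] : List Int).getD (t / L) 0 := by
  rw [dup_eq]
  rcases Nat.lt_or_ge t L with h0 | h0
  · have hx : t < (List.replicate L (0 : Int)).length := by simpa using h0
    rw [List.getD_append _ _ _ _ hx, replicate_getD L t 0 0 h0, Nat.div_eq_of_lt h0]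
    rfl
  · have hx : (List.replicate L (0 : Int)).length ≤ t := by simpa using h0
    rw [List.getD_append_right _ _ _ _ hx]
    simp only [List.length_replicate]
    rcases Nat.lt_or_ge t (2 * L) with h1 | h1
    · have hy : t - L < (List.replicate L (1 : Int)).length := by simp; omega
      rw [List.getD_append _ _ _ _ hy, replicate_getD L (t - L) 1 0 (by omega),
          Nat.div_eq_of_lt_le (show 1 * L ≤ t by omega) (show t < (1 + 1) * L by omega)]
      rfl
    · have hy : (List.replicate L (1 : Int)).length ≤ t - L := by simp; omega
      rw [List.getD_append_right _ _ _ _ hy]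
      simp only [List.length_replicate]
      rcases Nat.lt_or_ge t (3 * L) with h2 | h2
      · have hz : t - L - L < (List.replicate L (0 : Int)).length := by simp; omega
        rw [List.getD_append _ _ _ _ hz, replicate_getD L (t - L - L) 0 0 (by omega),
            Nat.div_eq_of_lt_le (show 2 * L ≤ t by omega) (show t < (2 + 1) * L by omega)]
        rfl
      · have hz : (List.replicate L (0 : Int)).length ≤ t - L - L := by simp; omega
        rw [List.getD_append_right _ _ _ _ hz]
        simp only [List.length_replicate]
        rcases Nat.lt_or_ge t (4 * L) with h3 | h3
        · rw [replicate_getD L (t - L - L - L) (-1) 0 (by omega),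
              Nat.div_eq_of_lt_le (show 3 * L ≤ t by omega) (show t < (3 + 1) * L by omega)]
          rfl
        · rw [List.getD_eq_default _ _ (by simp; omega)]
          have h4 : 4 ≤ t / L := (Nat.le_div_iff_mul_le hL).2 (by omega)
          rw [List.getD_eq_default _ _ (by simp; omega)]

-- ((j+1)/L) % 4 only depends on j modulo 4L
lemma div_mod_four (L j : Nat) (hL : 0 < L) :
    ((j + 1) / L) % 4 = ((j % (4 * L) + 1) / L) % 4 := by
  conv_lhs => rw [← Nat.div_add_mod j (4 * L)]
  have h : 4 * L * (j / (4 * L)) + j % (4 * L) + 1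
      = (j % (4 * L) + 1) + (4 * (j / (4 * L))) * L := by ring
  rw [h, Nat.add_mul_div_right _ _ hL, Nat.add_mul_mod_self_left]

lemma drop_getD (l : List Int) (m : Nat) (d : Int) :
    (l.drop 1).getD m d = l.getD (m + 1) d := by
  simp [List.getD, Nat.add_comm m 1]

-- the rotated duplicated pattern, read cyclically, is coef
lemma rot_getD (L j : Nat) (hL : 0 < L) :
    ((duplicateItems basePattern L).drop 1
        ++ [(duplicateItems basePattern L).getD 0 0]).getD (j % (4 * L)) 0 = coef L j := by
  have h4L : 0 < 4 * L := by omega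
  have hr : j % (4 * L) < 4 * L := Nat.mod_lt _ h4L
  set r := j % (4 * L) with hrdef
  have hlen : ((duplicateItems basePattern L).drop 1).length = 4 * L - 1 := by
    simp [dup_length]
  unfold coef
  rw [div_mod_four L j hL, ← hrdef]
  rcases Nat.lt_or_ge r (4 * L - 1) with h | h
  · rw [List.getD_append _ _ _ _ (by omega), drop_getD, dup_getD L (r + 1) hL]
    have hlt : (r + 1) / L < 4 := (Nat.div_lt_iff_lt_mul hL).2 (by omega)
    rw [Nat.mod_eq_of_lt hlt]
  · have hr' : r = 4 * L - 1 := by omega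
    rw [List.getD_append_right _ _ _ _ (by omega), hlen, hr']
    have : 4 * L - 1 - (4 * L - 1) = 0 := by omega
    rw [this]
    have hdiv : (4 * L - 1 + 1) / L = 4 := by
      have h41 : 4 * L - 1 + 1 = 4 * L := by omega
      rw [h41, Nat.mul_div_cancel 4 hL]
    rw [hdiv]
    simp only [List.getD_cons_zero]
    rw [dup_getD L 0 hL, Nat.zero_div]

-- one round of A equals one round of B
lemma step_eq (res : List Int) : stepA res = stepB res := by
  unfold stepA stepB
  apply List.map_congr_left
  intro i hi
  rw [List.mem_range] at hi
  set L := i + 1 with hLdef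
  have hL : 0 < L := by omega
  -- A's cyclic dot product = ∑ over range of coef-weighted terms
  have hAsum : zipCycleSum res
      ((duplicateItems basePattern L).drop 1 ++ [(duplicateItems basePattern L).getD 0 0])
      = ∑ j ∈ Finset.range res.length, res.getD j 0 * coef L j := by
    unfold zipCycleSum
    have hlen : ((duplicateItems basePattern L).drop 1
        ++ [(duplicateItems basePattern L).getD 0 0]).length = 4 * L := by
      simp [dup_length]; omega
    rw [show (∑ j ∈ Finset.range res.length, res.getD j 0 * coef L j)
        = ((List.range res.length).map (fun j => res.getD j 0 * coef L j)).sum from rfl]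
    congr 1
    apply List.map_congr_left
    intro j _
    rw [hlen, rot_getD L j hL]
  -- B's block sum = ∑ over Ico (L-1) n
  have hBsum : blockSum (List.scanl (· + ·) 0 res) res.length L i 1
      = ∑ j ∈ Finset.Ico (L - 1) res.length, res.getD j 0 * coef L j := by
    have h0 : (2 * 0 + 1) * L - 1 = i := by omega
    have hb := blockSum_eq res L hL res.length 0 (by omega)
    rw [h0] at hb
    simpa using hb
  have key : zipCycleSum res
      ((duplicateItems basePattern L).drop 1 ++ [(duplicateItems basePattern L).getD 0 0])
      = blockSum (List.scanl (· + ·) 0 res) res.length L i 1 := by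
    rw [hAsum, hBsum]
    -- the first L-1 coefficients are 0
    rw [Finset.range_eq_Ico]
    set q := min (L - 1) res.length with hq
    rw [← Finset.sum_Ico_consecutive (fun j => res.getD j 0 * coef L j)
          (Nat.zero_le q) (by omega)]
    have e0 : ∑ j ∈ Finset.Ico 0 q, res.getD j 0 * coef L j = 0 := by
      apply Finset.sum_eq_zero
      intro j hj
      rw [Finset.mem_Ico] at hj
      rw [coef_small L j (by omega), mul_zero]
    have e1 : Finset.Ico q res.length = Finset.Ico (L - 1) res.length := by
      rcases le_or_gt (L - 1) res.length with h | h
      · rw [hq, min_eq_left h]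
      · rw [Finset.Ico_eq_empty (by omega), Finset.Ico_eq_empty (by omega)]
    rw [e0, e1, zero_add]
  rw [key]

-- ===== VERDICT (by name: the statement is the Claim_ definition above) =====
theorem part1_spec : Claim_equal_part1 := by
  intro signal _
  unfold Spec_part1 part1 part1_alt
  have h : (fun (result : List Int) (_ : Nat) => stepA result)
      = fun (res : List Int) (_ : Nat) => stepB res := by
    funext res _
    exact step_eq res
  rw [h]
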